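-- pv_equiv track=rewrite | github.com/DfX-NYUAD/OptiLock | src/OptiLock_MuxLink_VS_Searching.py | split_dictionary
-- ===== SOURCE A (Python) =====
-- def split_dictionary(data, num_parts):
--     # Calculate the number of items each part should have
--     total_items = len(data)
--     items_per_part = total_items // num_parts
--     remainder = total_items % num_parts
--
--     # Create a list to store the smaller dictionaries
--     split_dicts = [{} for _ in range(num_parts)]
--
--     # Initialize an index for tracking which part to add to
--     part_index = 0
--     item_count = 0
--
--     # Iterate over the original dictionary and distribute the items
--     for idx, (key, value) in enumerate(data.items()):
--         # Add the key-value pair to the appropriate smaller dictionary with reset key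
--         split_dicts[part_index][item_count] = value
--         item_count += 1
--
--         # Move to the next dictionary if the current one is full
--         if item_count == items_per_part + (1 if part_index < remainder else 0):
--             part_index += 1
--             item_count = 0
--
--     return split_dicts
-- ===== SOURCE B (Python) =====
-- def split_dictionary(data, num_parts):
--     values = list(data.values())
--     q, r = divmod(len(values), num_parts)
--     result = []
--     start = 0
--     for p in range(num_parts):
--         size = q + (1 if p < r else 0)
--         chunk = values[start:start + size]
--         result.append(dict(enumerate(chunk)))
--         start += size
--     return result
-- ===== Notes on version B (the rewrite author's own statement) =====
-- stated objective: alternative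
-- what changed: B iterates over the part indices, precomputing each part's size from divmod and slicing that chunk out of the value list, instead of A's single rolling pass over the items that increments a per-part counter and rolls the part index over when a part fills.
import Mathlib
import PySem

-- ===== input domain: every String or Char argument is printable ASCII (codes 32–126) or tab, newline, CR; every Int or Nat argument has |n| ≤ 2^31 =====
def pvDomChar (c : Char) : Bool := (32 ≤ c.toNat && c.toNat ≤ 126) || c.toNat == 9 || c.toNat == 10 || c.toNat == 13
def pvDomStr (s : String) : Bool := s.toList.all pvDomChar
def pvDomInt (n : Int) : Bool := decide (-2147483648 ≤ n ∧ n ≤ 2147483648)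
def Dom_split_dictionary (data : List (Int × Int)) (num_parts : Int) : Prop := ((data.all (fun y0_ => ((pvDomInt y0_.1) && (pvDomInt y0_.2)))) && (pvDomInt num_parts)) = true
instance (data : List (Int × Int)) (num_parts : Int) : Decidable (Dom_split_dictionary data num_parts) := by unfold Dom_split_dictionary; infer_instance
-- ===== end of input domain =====

-- B splits the value list by slicing one precomputed-size chunk per part, instead of A's
-- rolling per-item pass; alternative decomposition, same cost.

-- ===== PORT A =====

-- `split_dicts[part_index][item_count] = value`: update of the list element at index i.
-- Exact for 0 ≤ i < length (part_index is never negative, and under Pre_ it never runs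
-- past the end; out of range Python raises IndexError, excluded by Pre_).
def pvModifyAt {α : Type} (l : List α) (i : Int) (f : α → α) : List α :=
  match l with
  | [] => []
  | x :: xs => if i = 0 then f x :: xs else x :: pvModifyAt xs (i - 1) f

-- the `for idx, (key, value) in enumerate(data.items())` loop (idx and key are unused)
def pvFillLoop (q r : Int) : List (Int × Int) → List (PySem.Dict Int Int) → Int → Int →
    List (PySem.Dict Int Int)
  | [], parts, _, _ => parts
  | (_, value) :: rest, parts, part_index, item_count =>
    let parts := pvModifyAt parts part_index (fun d => d.insert item_count value)
    let item_count := item_count + 1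
    if item_count = q + (if part_index < r then 1 else 0) then
      pvFillLoop q r rest parts (part_index + 1) 0
    else
      pvFillLoop q r rest parts part_index item_count

def split_dictionary (data : List (Int × Int)) (num_parts : Int) : List (List (Int × Int)) :=
  let items := (PySem.Dict.ofList data).items
  let total_items : Int := items.length
  let items_per_part := PySem.Int.floordiv total_items num_parts
  let remainder := PySem.Int.mod total_items num_parts
  let split_dicts := (PySem.List.pyRange 0 num_parts 1).map (fun _ => (PySem.Dict.empty : PySem.Dict Int Int))
  (pvFillLoop items_per_part remainder items split_dicts 0 0).map PySem.Dict.items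

-- ===== PORT B =====

-- `dict(enumerate(chunk))` has the fresh keys 0..len(chunk)-1, so its item list is exactly
-- list(enumerate(chunk)).
def split_dictionary_alt (data : List (Int × Int)) (num_parts : Int) : List (List (Int × Int)) :=
  let values := (PySem.Dict.ofList data).values
  let total : Int := values.length
  let q := PySem.Int.floordiv total num_parts
  let r := PySem.Int.mod total num_parts
  ((PySem.List.pyRange 0 num_parts 1).foldl
    (fun (st : List (List (Int × Int)) × Int) p =>
      let size := q + (if p < r then 1 else 0)
      let chunk := PySem.List.slice values (some st.2) (some (st.2 + size))
      (st.1 ++ [PySem.List.enumerate chunk 0], st.2 + size))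
    ([], 0)).1

-- ===== PRECONDITION & SPEC =====
-- num_parts = 0 raises ZeroDivisionError; num_parts < 0 with a non-empty dict raises
-- IndexError (split_dicts is empty). Both are excluded; nothing A returns on is excluded.
def Pre_split_dictionary (data : List (Int × Int)) (num_parts : Int) : Prop :=
  num_parts ≠ 0 ∧ (0 < num_parts ∨ data = [])
instance (data : List (Int × Int)) (num_parts : Int) : Decidable (Pre_split_dictionary data num_parts) := by unfold Pre_split_dictionary; infer_instance

def pvWitness_split_dictionary : (List (Int × Int)) × Int := ([(1, 2), (3, 4), (5, 6)], 2)

def Spec_split_dictionary (data : List (Int × Int)) (num_parts : Int) (out : List (List (Int × Int))) : Prop := out = split_dictionary_alt data num_parts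
instance (data : List (Int × Int)) (num_parts : Int) (out : List (List (Int × Int))) : Decidable (Spec_split_dictionary data num_parts out) := by unfold Spec_split_dictionary; infer_instance

-- ===== CLAIM (what is proved, stated in full; the proofs are below) =====
def Claim_equal_split_dictionary : Prop := ∀ (data : List (Int × Int)) (num_parts : Int), Dom_split_dictionary data num_parts → Pre_split_dictionary data num_parts → Spec_split_dictionary data num_parts (split_dictionary data num_parts)

-- ===== LEMMAS AND PROOFS =====

-- size of part p, and the total size of parts p, p+1, …, p+m-1
def pvSz (qn rn p : Nat) : Nat := qn + (if p < rn then 1 else 0)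

def pvSumSz (qn rn : Nat) : Nat → Nat → Nat
  | 0, _ => 0
  | m + 1, p => pvSz qn rn p + pvSumSz qn rn m (p + 1)

-- the common shape both ports produce: one enumerated chunk per remaining part
def pvChunks (qn rn : Nat) : Nat → Nat → List Int → List (List (Int × Int))
  | 0, _, _ => []
  | m + 1, p, vs =>
    PySem.List.enumerate (vs.take (pvSz qn rn p)) 0 :: pvChunks qn rn m (p + 1) (vs.drop (pvSz qn rn p))

theorem pvModifyAt_append {α : Type} (done : List α) (d : α) (rest : List α) (f : α → α) :
    pvModifyAt (done ++ d :: rest) (done.length : Int) f = done ++ f d :: rest := by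
  induction done with
  | nil => simp [pvModifyAt]
  | cons x xs ih =>
    simp only [List.cons_append, pvModifyAt, List.length_cons]
    rw [if_neg (by push_cast; omega)]
    have h1 : ((xs.length + 1 : Nat) : Int) - 1 = (xs.length : Int) := by push_cast; ring
    rw [h1, ih]

set_option maxRecDepth 8192 in
theorem pvFillLoop_fill (qn rn : Nat) (done rest : List (PySem.Dict Int Int)) :
    ∀ (c : Nat) (k : Nat) (vsl : List (Int × Int)) (d : PySem.Dict Int Int),
      k + c = pvSz qn rn done.length → 1 ≤ c → c ≤ vsl.length →
      (∀ j : Int, (k : Int) ≤ j → d.contains j = false) →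
      pvFillLoop (qn : Int) (rn : Int) vsl (done ++ d :: rest) (done.length : Int) (k : Int) =
      pvFillLoop (qn : Int) (rn : Int) (vsl.drop c)
        (done ++ PySem.Dict.mk (d.items ++ PySem.List.enumerate ((vsl.take c).map (·.2)) (k : Int)) :: rest)
        ((done.length : Int) + 1) 0 := by
  intro c
  induction c with
  | zero => intro k vsl d _ h1 _ _; omega
  | succ c ih =>
    intro k vsl d hsz _ hlen hfresh
    match vsl with
    | [] => simp at hlen
    | (key, v) :: vrest =>
      have hins : d.insert (k : Int) v = PySem.Dict.mk (d.items ++ [((k : Int), v)]) := by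
        apply PySem.Dict.ext
        rw [PySem.Dict.items_insert_of_not_contains _ _ (hfresh _ le_rfl)]
      simp only [pvFillLoop, pvModifyAt_append]
      have hcond : ((k : Int) + 1 = (qn : Int) + (if (done.length : Int) < (rn : Int) then 1 else 0))
          ↔ c = 0 := by
        unfold pvSz at hsz
        split_ifs with h <;> split_ifs at hsz with h' <;> omega
      by_cases hc : c = 0
      · rw [if_pos (hcond.mpr hc)]
        subst hc
        simp only [List.drop_succ_cons, List.drop_zero, List.take_succ_cons, List.take_zero,
          List.map_cons, List.map_nil, PySem.List.enumerate_cons, PySem.List.enumerate_nil]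
        rw [hins]
      · rw [if_neg (fun h => hc (hcond.mp h))]
        have hk1 : ((k : Int) + 1) = ((k + 1 : Nat) : Int) := by omega
        rw [hk1, hins, ih (k + 1) vrest _ (by omega) (by omega) (by simp only [List.length_cons] at hlen; omega)]
        · simp only [List.drop_succ_cons, List.take_succ_cons, List.map_cons,
            PySem.List.enumerate_cons]
          rw [List.append_assoc, List.singleton_append, hk1]
        · intro j hj
          rw [← hins, PySem.Dict.contains_insert]
          have : (j == (k : Int)) = false := by
            simp only [beq_eq_false_iff_ne, ne_eq]
            intro h; subst h; push_cast at hj; omega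
          rw [this, Bool.false_or]
          exact hfresh j (by push_cast at hj ⊢; omega)

theorem pvSumSz_eq_zero (qn rn : Nat) (hq : qn = 0) :
    ∀ (m p : Nat), rn ≤ p → pvSumSz qn rn m p = 0 := by
  subst hq
  intro m
  induction m with
  | zero => intro p _; rfl
  | succ m ih =>
    intro p hp
    simp only [pvSumSz, pvSz, if_neg (by omega : ¬ p < rn), ih (p + 1) (by omega)]

theorem pvChunks_nil (qn rn : Nat) :
    ∀ (m p : Nat), pvChunks qn rn m p [] = List.replicate m [] := by
  intro m
  induction m with
  | zero => intro p; rfl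
  | succ m ih => intro p; simp [pvChunks, PySem.List.enumerate_nil, ih, List.replicate_succ]

theorem pvFillLoop_outer (qn rn : Nat) :
    ∀ (m : Nat) (p : Nat) (vsl : List (Int × Int)) (done : List (PySem.Dict Int Int)),
      p = done.length → vsl.length = pvSumSz qn rn m p →
      (pvFillLoop (qn : Int) (rn : Int) vsl (done ++ List.replicate m PySem.Dict.empty) (p : Int) 0).map
          PySem.Dict.items =
        done.map PySem.Dict.items ++ pvChunks qn rn m p (vsl.map (·.2)) := by
  intro m
  induction m with
  | zero =>
    intro p vsl done hp hlen
    have : vsl = [] := by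
      cases vsl with
      | nil => rfl
      | cons a l => simp [pvSumSz] at hlen
    subst this
    simp [pvFillLoop, pvChunks]
  | succ m ih =>
    intro p vsl done hp hlen
    simp only [List.replicate_succ]
    by_cases hsz : pvSz qn rn p = 0
    · have hq : qn = 0 := by unfold pvSz at hsz; omega
      have hr : rn ≤ p := by unfold pvSz at hsz; split_ifs at hsz with h <;> omega
      have hlen0 : vsl.length = 0 := by
        rw [hlen]
        have h0 := pvSumSz_eq_zero qn rn hq m (p + 1) (by omega)
        simp [pvSumSz, hsz, h0]
      have : vsl = [] := List.eq_nil_of_length_eq_zero hlen0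
      subst this
      simp only [pvFillLoop, List.map_nil, pvChunks, List.take_nil, List.drop_nil,
        PySem.List.enumerate_nil, pvChunks_nil, List.map_append, List.map_cons,
        List.map_replicate]
      rfl
    · have hfill := pvFillLoop_fill qn rn done (List.replicate m PySem.Dict.empty)
        (pvSz qn rn p) 0 vsl PySem.Dict.empty (by rw [hp]; exact Nat.zero_add _) (by omega)
        (by rw [hlen]; simp [pvSumSz])
        (by intro j _; exact PySem.Dict.contains_empty j)
      simp only [Nat.cast_zero] at hfill
      rw [hp] at hfill ⊢
      rw [hfill]
      have hstep : ((done.length : Int) + 1) = ((done.length + 1 : Nat) : Int) := by omega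
      rw [hstep]
      have hdone' : done.length + 1 = (done ++ [PySem.Dict.mk
          (PySem.Dict.empty.items ++ PySem.List.enumerate ((vsl.take (pvSz qn rn done.length)).map (fun x : Int × Int => x.2)) (0 : Int))]).length := by
        simp
      rw [show (done ++ PySem.Dict.mk (PySem.Dict.empty.items ++
            PySem.List.enumerate ((vsl.take (pvSz qn rn done.length)).map (fun x : Int × Int => x.2)) (0 : Int)) ::
            List.replicate m PySem.Dict.empty) =
          ((done ++ [PySem.Dict.mk (PySem.Dict.empty.items ++
            PySem.List.enumerate ((vsl.take (pvSz qn rn done.length)).map (fun x : Int × Int => x.2)) (0 : Int))]) ++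
            List.replicate m PySem.Dict.empty) by simp]
      rw [ih (done.length + 1) (vsl.drop (pvSz qn rn done.length)) _ hdone'
        (by rw [List.length_drop, hlen, hp]; simp only [pvSumSz]; omega)]
      simp only [List.map_append, List.map_cons, List.map_nil, List.append_assoc,
        List.cons_append, List.nil_append, pvChunks]
      congr 2
      · show PySem.Dict.empty.items ++ _ = _
        rw [List.map_take]
        rfl
      · rw [List.map_drop]

theorem pvSumSz_closed (qn rn : Nat) :
    ∀ (m p : Nat), pvSumSz qn rn m p = m * qn + (min rn (p + m) - min rn p) := by
  intro m
  induction m with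
  | zero => intro p; simp [pvSumSz]
  | succ m ih =>
    intro p
    simp only [pvSumSz, pvSz, ih (p + 1), Nat.succ_mul]
    split_ifs with h <;> omega

theorem pvAltFold (qn rn : Nat) (values : List Int) :
    ∀ (m p s : Nat) (acc : List (List (Int × Int))),
      (((PySem.List.pyRange (p : Int) ((p : Int) + (m : Int)) 1).foldl
        (fun (st : List (List (Int × Int)) × Int) q =>
          (st.1 ++ [PySem.List.enumerate
            (PySem.List.slice values (some st.2)
              (some (st.2 + ((qn : Int) + (if q < (rn : Int) then 1 else 0))))) 0],
           st.2 + ((qn : Int) + (if q < (rn : Int) then 1 else 0))))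
        (acc, (s : Nat))).1 : List (List (Int × Int))) =
      acc ++ pvChunks qn rn m p (values.drop s) := by
  intro m
  induction m with
  | zero =>
    intro p s acc
    rw [show ((p : Int) + ((0 : Nat) : Int)) = (p : Int) by push_cast; ring,
      PySem.List.pyRange_one_eq_nil le_rfl]
    simp [pvChunks]
  | succ m ih =>
    intro p s acc
    rw [PySem.List.pyRange_one_cons (by push_cast; omega)]
    simp only [List.foldl_cons]
    have hszc : ((qn : Int) + (if (p : Int) < (rn : Int) then 1 else 0)) = ((pvSz qn rn p : Nat) : Int) := by
      unfold pvSz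
      split_ifs with h h' <;> omega
    have hslice : PySem.List.slice values (some ((s : Nat) : Int))
        (some (((s : Nat) : Int) + ((qn : Int) + (if (p : Int) < (rn : Int) then 1 else 0)))) =
        (values.drop s).take (pvSz qn rn p) := by
      rw [hszc, PySem.List.slice_natCast_add]
    rw [hslice, hszc]
    have hs' : ((s : Int) + ((pvSz qn rn p : Nat) : Int)) = ((s + pvSz qn rn p : Nat) : Int) := by
      omega
    have hp' : ((p : Int) + 1) = ((p + 1 : Nat) : Int) := by omega
    have hend : ((p : Int) + ((m + 1 : Nat) : Int)) = ((p + 1 : Nat) : Int) + ((m : Nat) : Int) := by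
      omega
    rw [hs', hp', hend, ih (p + 1) (s + pvSz qn rn p) _]
    simp only [pvChunks, List.append_assoc, List.cons_append, List.nil_append]
    congr 2
    rw [← List.drop_drop]

theorem pvParts_replicate (np : Nat) :
    (PySem.List.pyRange 0 (np : Int) 1).map (fun _ => (PySem.Dict.empty : PySem.Dict Int Int)) =
      List.replicate np PySem.Dict.empty := by
  rw [PySem.List.pyRange_one, List.map_map]
  simp [Function.comp_def, List.map_const']

-- ===== VERDICT (by name: the statement is the Claim_ definition above) =====
theorem split_dictionary_spec : Claim_equal_split_dictionary := by
  intro data num_parts _ hpre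
  unfold Spec_split_dictionary split_dictionary split_dictionary_alt
  obtain ⟨hne, hdisj⟩ := hpre
  by_cases hpos : 0 < num_parts
  · -- num_parts > 0
    obtain ⟨np, rfl⟩ : ∃ np : Nat, num_parts = (np : Int) :=
      ⟨num_parts.toNat, (Int.toNat_of_nonneg (by omega)).symm⟩
    have hnp : 0 < np := by exact_mod_cast hpos
    set items := (PySem.Dict.ofList data).items with hitems
    have hvals : (PySem.Dict.ofList data).values = items.map (·.2) := rfl
    set n := items.length with hn
    have hq : PySem.Int.floordiv (n : Int) (np : Int) = ((n / np : Nat) : Int) :=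
      PySem.Int.floordiv_natCast n np
    have hr : PySem.Int.mod (n : Int) (np : Int) = ((n % np : Nat) : Int) :=
      PySem.Int.mod_natCast n np
    simp only [hvals, List.length_map, ← hn, hq, hr, pvParts_replicate]
    have houter := pvFillLoop_outer (n / np) (n % np) np 0 items []
      (by rfl)
      (by
        rw [pvSumSz_closed]
        have h1 : n % np < np := Nat.mod_lt _ hnp
        have h2 : np * (n / np) + n % np = n := Nat.div_add_mod n np
        omega)
    have halt := pvAltFold (n / np) (n % np) (items.map (·.2)) np 0 0 []
    rw [show ((0 : Nat) : Int) = (0 : Int) by rfl] at houter halt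
    rw [show ((0 : Int) + (np : Int)) = (np : Int) by ring] at halt
    simp only [List.nil_append, List.map_nil, List.drop_zero] at houter halt
    rw [houter, halt]
  · -- num_parts < 0 and data = []: both results are the empty list of parts
    have hnil : data = [] := by
      rcases hdisj with h | h
      · exact absurd h hpos
      · exact h
    subst hnil
    have hneg : num_parts < 0 := by omega
    rw [PySem.List.pyRange_one_eq_nil (by omega)]
    rfl
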